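-- pv_equiv track=rewrite | github.com/mit-nms/Engram | SystemBench/ADRS/adrs_evaluator.py | discover_helper_code_and_evolvable_code
-- ===== SOURCE A (Python) =====
-- from typing import Dict, Any, List, Tuple, Optional
--
-- def discover_helper_code_and_evolvable_code(initial_program: str) -> Tuple[str, str]:
--     """If there is something outside # EVOLVE-BLOCK-START and # EVOLVE-BLOCK-END block, return it."""
--     helper_code = ""
--     if "EVOLVE-BLOCK" not in initial_program:
--         return helper_code, initial_program
--     else:
--         evolvable_code = ""
--         found_evolve_block_end = False
--         for line in initial_program.split("\n"):
--             if found_evolve_block_end: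
--                 helper_code += line + "\n"
--             else:
--                 evolvable_code += line + "\n"
--             # Lines after EVOLVE-BLOCK-END
--             if "EVOLVE-BLOCK-END" in line:
--                 found_evolve_block_end = True
--         return helper_code, evolvable_code
-- ===== SOURCE B (Python) =====
-- def discover_helper_code_and_evolvable_code(initial_program: str):
--     """If there is something outside # EVOLVE-BLOCK-START and # EVOLVE-BLOCK-END block, return it."""
--     if "EVOLVE-BLOCK" not in initial_program:
--         return "", initial_program
--     lines = initial_program.split("\n")
--     split = len(lines)
--     for i, line in enumerate(lines):
--         if "EVOLVE-BLOCK-END" in line: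
--             split = i + 1
--             break
--     evolvable_code = "".join(l + "\n" for l in lines[:split])
--     helper_code = "".join(l + "\n" for l in lines[split:])
--     return helper_code, evolvable_code
-- ===== Notes on version B (the rewrite author's own statement) =====
-- stated objective: simpler
-- what changed: Replaces A's flag-driven single pass that interleaves appends into two growing strings with a locate-then-slice decomposition: find the index of the first line containing the block-end marker (breaking immediately), then build both parts by slicing the line list there and joining each slice once.
import Mathlib
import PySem

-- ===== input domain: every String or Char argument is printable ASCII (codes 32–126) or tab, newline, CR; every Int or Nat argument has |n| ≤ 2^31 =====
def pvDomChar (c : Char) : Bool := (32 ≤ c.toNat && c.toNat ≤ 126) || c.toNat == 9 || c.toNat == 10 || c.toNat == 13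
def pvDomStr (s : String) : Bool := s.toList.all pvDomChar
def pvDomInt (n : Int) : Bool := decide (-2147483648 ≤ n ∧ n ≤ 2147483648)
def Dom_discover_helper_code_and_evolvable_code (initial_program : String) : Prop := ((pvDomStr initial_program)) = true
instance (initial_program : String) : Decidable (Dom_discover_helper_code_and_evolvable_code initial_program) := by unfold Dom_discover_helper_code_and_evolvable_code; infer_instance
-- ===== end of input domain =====

-- B replaces A's flag-driven interleaved accumulation pass by locate-then-slice (find the
-- first 'EVOLVE-BLOCK-END' line, then slice and join once); objective: simpler.

-- ===== PORT A =====
-- A's loop body; the state is (helper_code, evolvable_code, found_evolve_block_end)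
def pvStep (st : String × String × Bool) (line : String) : String × String × Bool :=
  let st1 :=
    if st.2.2 then (st.1 ++ (line ++ "\n"), st.2.1, st.2.2)
    else (st.1, st.2.1 ++ (line ++ "\n"), st.2.2)
  if PySem.Str.isIn "EVOLVE-BLOCK-END" line then (st1.1, st1.2.1, true) else st1

def discover_helper_code_and_evolvable_code (initial_program : String) : String × String :=
  if PySem.Str.isIn "EVOLVE-BLOCK" initial_program = false then
    ("", initial_program)
  else
    -- for line in initial_program.split("\n"): …  (sep "\n" ≠ "", so split? is some)
    let st := ((PySem.Str.split? initial_program "\n").getD []).foldl pvStep ("", "", false)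
    (st.1, st.2.1)

-- ===== PORT B =====
-- ''.join(l + '\n' for l in ls)
def pvJoinNl (ls : List String) : String := PySem.Str.join "" (ls.map (fun l => l ++ "\n"))
-- index after the first line containing 'EVOLVE-BLOCK-END' (scan with break), else len(lines)
def pvSplitIdx (lines : List String) : Nat :=
  match lines.findIdx? (fun line => PySem.Str.isIn "EVOLVE-BLOCK-END" line) with
  | some i => i + 1
  | none => lines.length

def discover_helper_code_and_evolvable_code_alt (initial_program : String) : String × String :=
  if PySem.Str.isIn "EVOLVE-BLOCK" initial_program = false then
    ("", initial_program)
  else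
    let lines := (PySem.Str.split? initial_program "\n").getD []
    let split := pvSplitIdx lines
    (pvJoinNl (lines.drop split), pvJoinNl (lines.take split))

-- ===== PRECONDITION & SPEC =====
def Spec_discover_helper_code_and_evolvable_code (initial_program : String) (out : String × String) : Prop := out = discover_helper_code_and_evolvable_code_alt initial_program
instance (initial_program : String) (out : String × String) : Decidable (Spec_discover_helper_code_and_evolvable_code initial_program out) := by unfold Spec_discover_helper_code_and_evolvable_code; infer_instance

-- ===== CLAIM (what is proved, stated in full; the proofs are below) =====
def Claim_equal_discover_helper_code_and_evolvable_code : Prop := ∀ (initial_program : String), Dom_discover_helper_code_and_evolvable_code initial_program → Spec_discover_helper_code_and_evolvable_code initial_program (discover_helper_code_and_evolvable_code initial_program)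

-- ===== LEMMAS AND PROOFS =====

theorem pvChars_join_nil_cons (x : List Char) (rest : List (List Char)) :
    PySem.Chars.join [] (x :: rest) = x ++ PySem.Chars.join [] rest := by
  cases rest with
  | nil => simp [PySem.Chars.join_singleton, PySem.Chars.join_nil]
  | cons y r => simpa using PySem.Chars.join_cons_cons [] x y r

theorem pvJoinNl_nil : pvJoinNl [] = "" := by
  apply String.ext
  simp [pvJoinNl, PySem.Str.toList_join, PySem.Chars.join_nil]

theorem pvJoinNl_cons (a : String) (l : List String) :
    pvJoinNl (a :: l) = (a ++ "\n") ++ pvJoinNl l := by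
  apply String.ext
  simp [pvJoinNl, PySem.Str.toList_join, pvChars_join_nil_cons, String.toList_append]

theorem pvLoop_found (lines : List String) (h e : String) :
    lines.foldl pvStep (h, e, true) = (h ++ pvJoinNl lines, e, true) := by
  induction lines generalizing h with
  | nil => simp [pvJoinNl_nil]
  | cons a l ih =>
      simp only [List.foldl_cons, pvStep]
      by_cases hp : PySem.Str.isIn "EVOLVE-BLOCK-END" a = true <;>
        simp [ih, pvJoinNl_cons, String.append_assoc]

theorem pvLoop_eq (lines : List String) (h e : String) :
    ((lines.foldl pvStep (h, e, false)).1, (lines.foldl pvStep (h, e, false)).2.1)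
      = (h ++ pvJoinNl (lines.drop (pvSplitIdx lines)),
         e ++ pvJoinNl (lines.take (pvSplitIdx lines))) := by
  induction lines generalizing e with
  | nil => simp [pvJoinNl_nil, pvSplitIdx]
  | cons a l ih =>
      by_cases hp : PySem.Str.isIn "EVOLVE-BLOCK-END" a = true
      · have hs : pvSplitIdx (a :: l) = 1 := by
          simp only [pvSplitIdx, List.findIdx?_cons, hp, if_true]
        have h1 : pvStep (h, e, false) a = (h, e ++ (a ++ "\n"), true) := by
          simp only [pvStep]
          rw [if_pos hp]
          simp
        simp only [List.foldl_cons]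
        rw [h1, pvLoop_found, hs]
        simp [pvJoinNl_cons, pvJoinNl_nil, String.append_empty]
      · have hs : pvSplitIdx (a :: l) = pvSplitIdx l + 1 := by
          simp only [pvSplitIdx, List.findIdx?_cons, hp]
          cases l.findIdx? (fun line => PySem.Str.isIn "EVOLVE-BLOCK-END" line) <;> simp
        have h1 : pvStep (h, e, false) a = (h, e ++ (a ++ "\n"), false) := by
          simp only [pvStep]
          rw [if_neg hp]
          simp
        simp only [List.foldl_cons]
        rw [h1, ih, hs]
        simp [pvJoinNl_cons, String.append_assoc]

-- ===== VERDICT (by name: the statement is the Claim_ definition above) =====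
theorem discover_helper_code_and_evolvable_code_spec : Claim_equal_discover_helper_code_and_evolvable_code := by
  intro p _
  unfold Spec_discover_helper_code_and_evolvable_code
  unfold discover_helper_code_and_evolvable_code discover_helper_code_and_evolvable_code_alt
  by_cases hg : PySem.Str.isIn "EVOLVE-BLOCK" p = false
  · rw [if_pos hg, if_pos hg]
  · rw [if_neg hg, if_neg hg]
    simp only [pvLoop_eq, String.empty_append]
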